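-- pv_equiv track=rewrite | github.com/AlecVOV/AIO2024-100-Days-with-Python | Day 16/Day 6/padding_image_with_matrix.py | convolution_matrix_with_zero_padding
-- ===== SOURCE A (Python) =====
-- def convolution_matrix_with_zero_padding(mat_a, mat_b):
--     result = []
--     for i in range(len(mat_a) - len(mat_b) + 1):
--         row = []
--         for j in range(len(mat_a[0]) - len(mat_b[0]) + 1):
--             sum = 0
--             for k in range(len(mat_b)):
--                 for l in range(len(mat_b[0])):
--                     sum += mat_a[i+k][j+l] * mat_b[k][l]
--             row.append(sum)
--         result.append(row)
--     return result
-- ===== SOURCE B (Python) =====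
-- def convolution_matrix_with_zero_padding(mat_a, mat_b):
--     rows = len(mat_a) - len(mat_b) + 1
--     if rows <= 0:
--         return []
--     cols = len(mat_a[0]) - len(mat_b[0]) + 1
--     if cols <= 0:
--         return [[] for _ in range(rows)]
--     result = [[0] * cols for _ in range(rows)]
--     for k in range(len(mat_b)):
--         for l in range(len(mat_b[0])):
--             w = mat_b[k][l]
--             result = [[result[i][j] + w * mat_a[i + k][j + l]
--                        for j in range(cols)] for i in range(rows)]
--     return result
-- ===== Notes on version B (the rewrite author's own statement) =====
-- stated objective: alternative
-- what changed: A gathers each output cell with a per-cell double sum over the kernel; B builds a zero matrix of the output shape and scatters each kernel weight w = mat_b[k][l] across it, accumulating w * shifted mat_a, with the kernel loops outermost.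
import Mathlib
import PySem

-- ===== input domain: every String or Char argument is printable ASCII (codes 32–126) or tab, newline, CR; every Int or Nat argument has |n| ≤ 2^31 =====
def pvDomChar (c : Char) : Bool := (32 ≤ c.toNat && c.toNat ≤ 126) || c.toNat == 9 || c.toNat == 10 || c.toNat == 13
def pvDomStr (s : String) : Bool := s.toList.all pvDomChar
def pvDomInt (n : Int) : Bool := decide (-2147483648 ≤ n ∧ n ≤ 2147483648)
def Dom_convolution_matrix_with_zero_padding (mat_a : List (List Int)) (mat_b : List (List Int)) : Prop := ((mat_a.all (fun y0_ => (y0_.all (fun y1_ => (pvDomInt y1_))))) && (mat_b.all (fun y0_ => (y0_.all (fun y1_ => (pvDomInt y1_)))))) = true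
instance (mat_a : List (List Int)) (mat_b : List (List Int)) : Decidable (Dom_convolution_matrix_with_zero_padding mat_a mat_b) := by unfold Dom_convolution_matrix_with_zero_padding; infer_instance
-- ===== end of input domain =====

-- B replaces A's per-cell gather (triple-nested sum per output entry) by a scatter over
-- kernel entries that accumulates w * shifted(mat_a) into a zero matrix (objective: alternative).

-- ===== PORT A =====
def convolution_matrix_with_zero_padding (mat_a : List (List Int)) (mat_b : List (List Int)) : List (List Int) :=
  (PySem.List.pyRange 0 ((mat_a.length : Int) - (mat_b.length : Int) + 1) 1).foldl (fun result i =>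
    result ++ [
      (PySem.List.pyRange 0 (((PySem.List.pyGetD mat_a 0 []).length : Int) - ((PySem.List.pyGetD mat_b 0 []).length : Int) + 1) 1).foldl (fun row j =>
        row ++ [
          (PySem.List.pyRange 0 ((mat_b.length : Int)) 1).foldl (fun s k =>
            (PySem.List.pyRange 0 (((PySem.List.pyGetD mat_b 0 []).length : Int)) 1).foldl (fun s l =>
              s + PySem.List.pyGetD (PySem.List.pyGetD mat_a (i + k) []) (j + l) 0 *
                  PySem.List.pyGetD (PySem.List.pyGetD mat_b k []) l 0) s) 0 ]) [] ]) []

-- ===== PORT B =====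
def convolution_matrix_with_zero_padding_alt (mat_a : List (List Int)) (mat_b : List (List Int)) : List (List Int) :=
  let rows : Int := (mat_a.length : Int) - (mat_b.length : Int) + 1
  if rows ≤ 0 then []
  else
    let cols : Int := ((PySem.List.pyGetD mat_a 0 []).length : Int) - ((PySem.List.pyGetD mat_b 0 []).length : Int) + 1
    if cols ≤ 0 then (PySem.List.pyRange 0 rows 1).map (fun _ => ([] : List Int))
    else
      (PySem.List.pyRange 0 (mat_b.length : Int) 1).foldl (fun result k =>
        (PySem.List.pyRange 0 (((PySem.List.pyGetD mat_b 0 []).length : Int)) 1).foldl (fun result l =>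
          let w := PySem.List.pyGetD (PySem.List.pyGetD mat_b k []) l 0
          (PySem.List.pyRange 0 rows 1).map (fun i =>
            (PySem.List.pyRange 0 cols 1).map (fun j =>
              PySem.List.pyGetD (PySem.List.pyGetD result i []) j 0 +
                w * PySem.List.pyGetD (PySem.List.pyGetD mat_a (i + k) []) (j + l) 0))) result)
        ((PySem.List.pyRange 0 rows 1).map (fun _ => List.replicate cols.toNat (0 : Int)))

-- ===== PRECONDITION & SPEC =====
-- Pre_ excludes exactly the inputs on which Python A raises IndexError: mat_a or mat_b empty
-- while the outer range is nonempty, or (when both output dimensions are positive) a row of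
-- mat_a shorter than mat_a[0] or a row of mat_b shorter than mat_b[0].
def Pre_convolution_matrix_with_zero_padding (mat_a : List (List Int)) (mat_b : List (List Int)) : Prop :=
  (mat_a.length : Int) < (mat_b.length : Int) ∨
  (mat_a ≠ [] ∧ mat_b ≠ [] ∧
    (((mat_a.getD 0 []).length : Int) < ((mat_b.getD 0 []).length : Int) ∨
     mat_b.getD 0 [] = [] ∨
     ((∀ r ∈ mat_a, (mat_a.getD 0 []).length ≤ r.length) ∧
      (∀ r ∈ mat_b, (mat_b.getD 0 []).length ≤ r.length))))
instance (mat_a : List (List Int)) (mat_b : List (List Int)) : Decidable (Pre_convolution_matrix_with_zero_padding mat_a mat_b) := by unfold Pre_convolution_matrix_with_zero_padding; infer_instance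

def pvWitness_convolution_matrix_with_zero_padding : List (List Int) × List (List Int) :=
  ([[1, 2], [3, 4]], [[1]])

def Spec_convolution_matrix_with_zero_padding (mat_a : List (List Int)) (mat_b : List (List Int)) (out : List (List Int)) : Prop := out = convolution_matrix_with_zero_padding_alt mat_a mat_b
instance (mat_a : List (List Int)) (mat_b : List (List Int)) (out : List (List Int)) : Decidable (Spec_convolution_matrix_with_zero_padding mat_a mat_b out) := by unfold Spec_convolution_matrix_with_zero_padding; infer_instance

-- ===== CLAIM (what is proved, stated in full; the proofs are below) =====
def Claim_equal_convolution_matrix_with_zero_padding : Prop := ∀ (mat_a : List (List Int)) (mat_b : List (List Int)), Dom_convolution_matrix_with_zero_padding mat_a mat_b → Pre_convolution_matrix_with_zero_padding mat_a mat_b → Spec_convolution_matrix_with_zero_padding mat_a mat_b (convolution_matrix_with_zero_padding mat_a mat_b)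

-- ===== LEMMAS AND PROOFS =====

-- matrices of the shape B's scatter loop maintains
def pvMkM (R C : Int) (g : Int → Int → Int) : List (List Int) :=
  (PySem.List.pyRange 0 R 1).map (fun i => (PySem.List.pyRange 0 C 1).map (g i))

theorem pvGetD_mkM (R C : Int) (g : Int → Int → Int) (i j : Int)
    (hi0 : 0 ≤ i) (hiR : i < R) (hj0 : 0 ≤ j) (hjC : j < C) :
    PySem.List.pyGetD (PySem.List.pyGetD
      ((PySem.List.pyRange 0 R 1).map (fun i => (PySem.List.pyRange 0 C 1).map (g i))) i []) j 0 = g i j := by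
  rw [PySem.List.pyGetD_map_pyRange_of_nonneg _ _ _ _ hi0 hiR,
      PySem.List.pyGetD_map_pyRange_of_nonneg _ _ _ _ hj0 hjC]

-- one scatter pass over a list of kernel positions, starting from a shaped matrix
theorem pvScatter {α : Type} (R C : Int) (L : List α) (h : α → Int → Int → Int) (g : Int → Int → Int) :
    L.foldl (fun res x =>
        (PySem.List.pyRange 0 R 1).map (fun i =>
          (PySem.List.pyRange 0 C 1).map (fun j =>
            PySem.List.pyGetD (PySem.List.pyGetD res i []) j 0 + h x i j))) (pvMkM R C g)
      = pvMkM R C (fun i j => g i j + (L.map (fun x => h x i j)).sum) := by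
  induction L generalizing g with
  | nil => simp [pvMkM]
  | cons x L ih =>
    rw [List.foldl_cons]
    have hstep :
        (PySem.List.pyRange 0 R 1).map (fun i =>
          (PySem.List.pyRange 0 C 1).map (fun j =>
            PySem.List.pyGetD (PySem.List.pyGetD (pvMkM R C g) i []) j 0 + h x i j))
        = pvMkM R C (fun i j => g i j + h x i j) := by
      unfold pvMkM
      refine List.map_congr_left (fun i hi => ?_)
      refine List.map_congr_left (fun j hj => ?_)
      rw [PySem.List.mem_pyRange_one] at hi hj
      rw [pvGetD_mkM R C g i j hi.1 hi.2 hj.1 hj.2]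

    rw [hstep, ih]
    simp [pvMkM, add_assoc]

-- the nested k/l scatter fold equals the full double sum
theorem pvScatter2 (R C : Int) (Lk Ll : List Int) (h : Int → Int → Int → Int → Int) (g : Int → Int → Int) :
    Lk.foldl (fun res k =>
        Ll.foldl (fun res l =>
          (PySem.List.pyRange 0 R 1).map (fun i =>
            (PySem.List.pyRange 0 C 1).map (fun j =>
              PySem.List.pyGetD (PySem.List.pyGetD res i []) j 0 + h k l i j))) res) (pvMkM R C g)
      = pvMkM R C (fun i j => g i j + (Lk.map (fun k => (Ll.map (fun l => h k l i j)).sum)).sum) := by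
  induction Lk generalizing g with
  | nil => simp [pvMkM]
  | cons k Lk ih =>
    rw [List.foldl_cons, pvScatter R C Ll (fun l => h k l) g, ih]
    simp [pvMkM, add_assoc]

-- A's per-cell value as a double sum
theorem pvCellA (Kb W : Int) (f : Int → Int → Int) :
    (PySem.List.pyRange 0 Kb 1).foldl (fun s k =>
        (PySem.List.pyRange 0 W 1).foldl (fun s l => s + f k l) s) 0
      = ((PySem.List.pyRange 0 Kb 1).map (fun k =>
          ((PySem.List.pyRange 0 W 1).map (fun l => f k l)).sum)).sum := by
  simp only [PySem.List.foldl_add]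
  simp

theorem convolution_matrix_with_zero_padding_eq_alt (mat_a mat_b : List (List Int)) :
    convolution_matrix_with_zero_padding mat_a mat_b
      = convolution_matrix_with_zero_padding_alt mat_a mat_b := by
  unfold convolution_matrix_with_zero_padding convolution_matrix_with_zero_padding_alt
  set R : Int := (mat_a.length : Int) - (mat_b.length : Int) + 1 with hR
  set C : Int := ((PySem.List.pyGetD mat_a 0 []).length : Int) - ((PySem.List.pyGetD mat_b 0 []).length : Int) + 1 with hC
  by_cases hRle : R ≤ 0
  · simp [hRle, PySem.List.pyRange_one_eq_nil hRle]
  · simp only [if_neg hRle]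
    by_cases hCle : C ≤ 0
    · simp only [if_pos hCle]
      rw [PySem.List.foldl_append_singleton_eq_map]
      simp [PySem.List.pyRange_one_eq_nil hCle]
    · simp only [if_neg hCle]
      -- A side: map of maps of cells
      rw [PySem.List.foldl_append_singleton_eq_map]
      have hA : ∀ i : Int,
          (PySem.List.pyRange 0 C 1).foldl (fun row j =>
            row ++ [
              (PySem.List.pyRange 0 ((mat_b.length : Int)) 1).foldl (fun s k =>
                (PySem.List.pyRange 0 (((PySem.List.pyGetD mat_b 0 []).length : Int)) 1).foldl (fun s l =>
                  s + PySem.List.pyGetD (PySem.List.pyGetD mat_a (i + k) []) (j + l) 0 *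
                      PySem.List.pyGetD (PySem.List.pyGetD mat_b k []) l 0) s) 0 ]) []
          = (PySem.List.pyRange 0 C 1).map (fun j =>
              ((PySem.List.pyRange 0 ((mat_b.length : Int)) 1).map (fun k =>
                ((PySem.List.pyRange 0 (((PySem.List.pyGetD mat_b 0 []).length : Int)) 1).map (fun l =>
                  PySem.List.pyGetD (PySem.List.pyGetD mat_a (i + k) []) (j + l) 0 *
                    PySem.List.pyGetD (PySem.List.pyGetD mat_b k []) l 0)).sum)).sum) := by
        intro i
        rw [PySem.List.foldl_append_singleton_eq_map]
        simp only [List.nil_append]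
        refine List.map_congr_left (fun j _ => ?_)
        exact pvCellA _ _ _
      -- B side: scatter fold from the zero matrix
      have hinit :
          (PySem.List.pyRange 0 R 1).map (fun _ => List.replicate C.toNat (0 : Int))
            = pvMkM R C (fun _ _ => 0) := by
        unfold pvMkM
        refine List.map_congr_left (fun i _ => ?_)
        rw [List.map_const', PySem.List.length_pyRange_one]
        simp
      rw [hinit,
          pvScatter2 R C _ _
            (fun k l i j =>
              PySem.List.pyGetD (PySem.List.pyGetD mat_b k []) l 0 *
                PySem.List.pyGetD (PySem.List.pyGetD mat_a (i + k) []) (j + l) 0)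
            (fun _ _ => 0)]
      unfold pvMkM
      refine List.map_congr_left (fun i _ => ?_)
      rw [hA i]
      refine List.map_congr_left (fun j _ => ?_)
      simp [mul_comm]

-- ===== VERDICT (by name: the statement is the Claim_ definition above) =====
theorem convolution_matrix_with_zero_padding_spec : Claim_equal_convolution_matrix_with_zero_padding := by
  intro mat_a mat_b _ _
  unfold Spec_convolution_matrix_with_zero_padding
  exact convolution_matrix_with_zero_padding_eq_alt mat_a mat_b
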